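-- pv_equiv track=rewrite | github.com/rajitbanerjee/advent-of-code | 2018/day05-alchemic-reduction/polymers.py | triggerReaction
-- ===== SOURCE A (Python) =====
-- def triggerReaction(polymer: str) -> str:
--     units, i = list(polymer), 0
--     while i < len(units)-2:
--         if abs(ord(units[i])-ord(units[i+1])) == 32:
--             units = units[:i] + units[i+2:]
--             if i:
--                 i -= 1
--         else:
--             i += 1
--     return ''.join(units)
-- ===== SOURCE B (Python) =====
-- def triggerReaction(polymer: str) -> str:
--     # Single-pass stack reduction; like A, the final character never reacts,
--     # so we reduce polymer[:-1] and append the last character.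
--     if not polymer:
--         return polymer
--     stack = []
--     for c in polymer[:-1]:
--         if stack and abs(ord(stack[-1]) - ord(c)) == 32:
--             stack.pop()
--         else:
--             stack.append(c)
--     stack.append(polymer[-1])
--     return ''.join(stack)
-- ===== Notes on version B (the rewrite author's own statement) =====
-- stated objective: faster
-- what changed: Replaced the quadratic rescan-and-splice while-loop with a single-pass stack reduction over polymer[:-1] (the last character, which A never lets react, is appended afterwards).
import Mathlib
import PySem

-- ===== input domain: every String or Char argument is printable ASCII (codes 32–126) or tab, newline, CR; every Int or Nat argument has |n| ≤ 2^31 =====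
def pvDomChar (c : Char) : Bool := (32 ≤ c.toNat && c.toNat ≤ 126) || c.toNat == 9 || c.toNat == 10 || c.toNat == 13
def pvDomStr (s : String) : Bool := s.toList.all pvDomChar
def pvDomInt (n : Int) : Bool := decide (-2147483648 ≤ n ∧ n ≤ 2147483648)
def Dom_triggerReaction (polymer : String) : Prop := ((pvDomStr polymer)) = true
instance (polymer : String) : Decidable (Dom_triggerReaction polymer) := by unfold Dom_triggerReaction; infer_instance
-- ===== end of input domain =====

-- B replaces A's rescan-and-splice while-loop by a single-pass stack reduction over
-- polymer[:-1] (the last character, which A never lets react, appended afterwards).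


-- ===== PORT A =====
-- abs(ord(x) - ord(y)) == 32
def pvReact (a b : Char) : Bool := ((a.toNat : Int) - (b.toNat : Int)).natAbs = 32

-- literal port of A's while-loop; i : Nat since Python's i stays ≥ 0 (so the guard
-- `i < len(units)-2` is `i + 2 < len`), `if i: i -= 1` is Nat subtraction `i - 1`,
-- indexing is in range while the guard holds so getD is exact, and
-- units[:i] + units[i+2:] is take/drop for 0 ≤ i.
def pvLoopA (units : List Char) (i : Nat) : List Char :=
  if _h : i + 2 < units.length then
    if pvReact (units.getD i ' ') (units.getD (i + 1) ' ') then
      pvLoopA (units.take i ++ units.drop (i + 2)) (i - 1)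
    else
      pvLoopA units (i + 1)
  else units
termination_by 3 * units.length - i
decreasing_by
  · simp only [List.length_append, List.length_take, List.length_drop]; omega
  · omega

def triggerReaction (polymer : String) : String := String.ofList (pvLoopA polymer.toList 0)

-- ===== PORT B =====
-- one stack step; stack kept top-first (reversed)
def pvStep (st : List Char) (c : Char) : List Char :=
  match st with
  | [] => [c]
  | h :: t => if pvReact h c then t else c :: h :: t

def triggerReaction_alt (polymer : String) : String :=
  let l := polymer.toList
  if l.isEmpty then polymer
  else String.ofList ((l.dropLast.foldl pvStep []).reverse ++ [l.getLastD ' '])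

-- ===== PRECONDITION & SPEC =====
def Spec_triggerReaction (polymer : String) (out : String) : Prop := out = triggerReaction_alt polymer
instance (polymer : String) (out : String) : Decidable (Spec_triggerReaction polymer out) := by unfold Spec_triggerReaction; infer_instance

-- ===== CLAIM (what is proved, stated in full; the proofs are below) =====
def Claim_equal_triggerReaction : Prop := ∀ (polymer : String), Dom_triggerReaction polymer → Spec_triggerReaction polymer (triggerReaction polymer)

-- ===== LEMMAS AND PROOFS =====

-- A's loop state ⟨p ++ rest ++ [z], i⟩ with |p| = i+1 computes exactly the stack
-- reduction of rest started from stack p.reverse, with z appended untouched.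
theorem pvLoopA_eq (rest p : List Char) (z : Char) (i : Nat)
    (hp : p.length = i + 1) :
    pvLoopA (p ++ rest ++ [z]) i = (rest.foldl pvStep p.reverse).reverse ++ [z] := by
  obtain ⟨q, a, rfl⟩ : ∃ q a, p = q ++ [a] := by
    rcases List.eq_nil_or_concat p with h | ⟨q, a, h⟩
    · simp [h] at hp
    · exact ⟨q, a, by simpa [List.concat_eq_append] using h⟩
  have hq : q.length = i := by simpa using hp
  cases rest with
  | nil =>
    rw [pvLoopA, dif_neg (by simp; omega)]
    simp
  | cons c rest' =>
    have hL : (q ++ [a]) ++ (c :: rest') ++ [z] = q ++ a :: c :: (rest' ++ [z]) := by simp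
    rw [hL, pvLoopA, dif_pos (by simp; omega)]
    have hgi : (q ++ a :: c :: (rest' ++ [z])).getD i ' ' = a := by
      simp [List.getD_eq_getElem?_getD, List.getElem?_append_right, hq]
    have hgi1 : (q ++ a :: c :: (rest' ++ [z])).getD (i + 1) ' ' = c := by
      rw [List.getD_eq_getElem?_getD, List.getElem?_append_right (by omega)]
      simp [hq]
    rw [hgi, hgi1]
    by_cases hr : pvReact a c
    · rw [if_pos hr]
      have htake : (q ++ a :: c :: (rest' ++ [z])).take i = q := List.take_left' hq
      have hdrop : (q ++ a :: c :: (rest' ++ [z])).drop (i + 2) = rest' ++ [z] := by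
        have h1 : q ++ a :: c :: (rest' ++ [z]) = (q ++ [a, c]) ++ (rest' ++ [z]) := by simp
        have h2 : i + 2 = (q ++ [a, c]).length := by simp [hq]
        rw [h1, h2, List.drop_left]
      have hfold : (c :: rest').foldl pvStep ((q ++ [a]).reverse) = rest'.foldl pvStep q.reverse := by
        simp [pvStep, hr]
      rw [htake, hdrop, hfold]
      cases q with
      | nil =>
        have hi0 : i = 0 := by simpa using hq.symm
        subst hi0
        cases rest' with
        | nil => rw [pvLoopA]; simp
        | cons d rest'' =>
          have ih := pvLoopA_eq rest'' [d] z 0 (by simp)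
          simpa [pvStep] using ih
      | cons q' qt =>
        have ih := pvLoopA_eq rest' (q' :: qt) z (i - 1) (by simp at hq ⊢; omega)
        simpa using ih
    · rw [if_neg hr]
      have ih := pvLoopA_eq rest' (q ++ [a] ++ [c]) z (i + 1) (by simp; omega)
      have hfold : (c :: rest').foldl pvStep ((q ++ [a]).reverse) =
          rest'.foldl pvStep ((q ++ [a] ++ [c]).reverse) := by
        simp [pvStep, hr]
      rw [hfold]
      simpa using ih
termination_by rest.length
decreasing_by all_goals simp

-- ===== VERDICT (by name: the statement is the Claim_ definition above) =====
theorem triggerReaction_spec : Claim_equal_triggerReaction := by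
  intro polymer _
  unfold Spec_triggerReaction triggerReaction triggerReaction_alt
  cases hl : polymer.toList with
  | nil =>
    have hp : polymer = "" := by
      have h2 := @String.ofList_toList polymer
      rw [hl] at h2; exact h2.symm
    rw [pvLoopA]
    simp [hp]
  | cons c t =>
    rcases List.eq_nil_or_concat t with rfl | ⟨m, z, rfl⟩
    · rw [pvLoopA]
      simp [pvStep]
    · simp only [List.concat_eq_append]
      have hA : pvLoopA (c :: (m ++ [z])) 0 = (m.foldl pvStep [c]).reverse ++ [z] := by
        simpa using pvLoopA_eq m [c] z 0 (by simp)
      have hd : (c :: (m ++ [z])).dropLast = c :: m := by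
        rw [show c :: (m ++ [z]) = (c :: m) ++ [z] by simp]
        exact List.dropLast_concat
      have hg : (c :: (m ++ [z])).getLast? = some z := by
        rw [show c :: (m ++ [z]) = (c :: m) ++ [z] by simp]
        exact List.getLast?_concat
      rw [hA]
      simp [hd, hg, pvStep]
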